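-- pv_equiv track=rewrite | github.com/julianwsavini/CS4100_Final | testing.py | separate_last_note_group
-- ===== SOURCE A (Python) =====
-- def separate_last_note_group(nmat):
--     x = len(nmat)-1 #index for last note
--     last_group =[]
--     for i in range(x, -1, -1):
--         curr = nmat[i]
--         if curr[0] != nmat[x][0]:
--             break
--         last_group.append(curr)
--     last_group.reverse()
--     return last_group, nmat[:-(len(last_group))]
-- ===== SOURCE B (Python) =====
-- def separate_last_note_group(nmat):
--     # Single forward pass: track the start index of the current run of equal onsets;
--     # the final run is the last note group.
--     start = 0
--     for i in range(1, len(nmat)):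
--         if nmat[i][0] != nmat[i - 1][0]:
--             start = i
--     return nmat[start:], nmat[:start]
-- ===== Notes on version B (the rewrite author's own statement) =====
-- stated objective: simpler
-- what changed: Replaces the backward scan-until-break with append+reverse+negative slice by a single forward pass that tracks the start index of the current equal-onset run, then slices the list once at that index.
-- outside the precondition, e.g. on separate_last_note_group([[], [1], [2]]): A returns ([[2]], [[], [1]]), B raises IndexError
import Mathlib
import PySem

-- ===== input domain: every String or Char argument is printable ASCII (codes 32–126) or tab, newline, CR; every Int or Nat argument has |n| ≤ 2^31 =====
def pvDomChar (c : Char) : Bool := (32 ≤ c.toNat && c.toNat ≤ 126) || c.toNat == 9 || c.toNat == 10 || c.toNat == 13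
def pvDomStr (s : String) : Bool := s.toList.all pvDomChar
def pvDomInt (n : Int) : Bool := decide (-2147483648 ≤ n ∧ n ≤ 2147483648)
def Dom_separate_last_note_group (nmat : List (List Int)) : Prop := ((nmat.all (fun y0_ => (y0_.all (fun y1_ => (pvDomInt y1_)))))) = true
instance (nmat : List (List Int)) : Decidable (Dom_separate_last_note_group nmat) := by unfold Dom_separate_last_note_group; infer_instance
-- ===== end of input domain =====

-- B replaces A's backward scan-until-break (append, reverse, negative slice) by a single
-- forward pass tracking the start index of the current equal-onset run (objective: simpler).

-- ===== PORT A =====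
def separate_last_note_group (nmat : List (List Int)) : List (List Int) × List (List Int) :=
  let x : Int := (nmat.length : Int) - 1
  let st := (PySem.List.pyRange x (-1) (-1)).foldl
    (fun st i =>
      if st.2 then
        let curr := PySem.List.pyGetD nmat i []
        if PySem.List.pyGetD curr 0 0 ≠ PySem.List.pyGetD (PySem.List.pyGetD nmat x []) 0 0
        then (st.1, false)
        else (st.1 ++ [curr], true)
      else st)
    (([] : List (List Int)), true)
  let last_group := st.1.reverse
  (last_group, PySem.List.slice nmat none (some (-(last_group.length : Int))))

-- ===== PORT B =====
def separate_last_note_group_alt (nmat : List (List Int)) : List (List Int) × List (List Int) :=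
  let start : Int := (PySem.List.pyRange 1 (nmat.length : Int) 1).foldl
    (fun start i =>
      if PySem.List.pyGetD (PySem.List.pyGetD nmat i []) 0 0
         ≠ PySem.List.pyGetD (PySem.List.pyGetD nmat (i - 1) []) 0 0
      then i else start) 0
  (PySem.List.slice nmat (some start) none, PySem.List.slice nmat none (some start))

-- ===== PRECONDITION & SPEC =====
-- Pre_ excludes note matrices containing an empty row: on those Python A raises IndexError
-- whenever its backward scan reaches the empty row (and still returns when the empty row lies
-- before the break point), while B's forward pass raises IndexError; row contents are never
-- inspected beyond index 0, so requiring every row nonempty is the natural domain.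
def Pre_separate_last_note_group (nmat : List (List Int)) : Prop :=
  ∀ r ∈ nmat, r ≠ []
instance (nmat : List (List Int)) : Decidable (Pre_separate_last_note_group nmat) := by
  unfold Pre_separate_last_note_group; infer_instance

def pvWitness_separate_last_note_group : List (List Int) := [[0, 60], [0, 64], [4, 67]]

def Spec_separate_last_note_group (nmat : List (List Int)) (out : List (List Int) × List (List Int)) : Prop := out = separate_last_note_group_alt nmat
instance (nmat : List (List Int)) (out : List (List Int) × List (List Int)) : Decidable (Spec_separate_last_note_group nmat out) := by unfold Spec_separate_last_note_group; infer_instance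

-- ===== CLAIM (what is proved, stated in full; the proofs are below) =====
def Claim_equal_separate_last_note_group : Prop := ∀ (nmat : List (List Int)), Dom_separate_last_note_group nmat → Pre_separate_last_note_group nmat → Spec_separate_last_note_group nmat (separate_last_note_group nmat)

-- ===== LEMMAS AND PROOFS =====

-- onset of a row, exactly as both ports read it
def pvOnset (r : List Int) : Int := PySem.List.pyGetD r 0 0

-- length of the maximal constant-onset suffix run
def pvRunLen (l : List (List Int)) : Nat :=
  match l.reverse with
  | [] => 0
  | a :: t => (t.takeWhile (fun r => decide (pvOnset r = pvOnset a))).length + 1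

lemma pvRunLen_concat (l : List (List Int)) (b : List Int) (h : l ≠ []) :
    pvRunLen (l ++ [b]) =
      if pvOnset b = pvOnset (l.getLast h) then pvRunLen l + 1 else 1 := by
  obtain ⟨a, t, ht⟩ : ∃ a t, l.reverse = a :: t := by
    cases hr : l.reverse with
    | nil => exact absurd (by simpa using hr) h
    | cons a t => exact ⟨a, t, rfl⟩
  have ha : a = l.getLast h := by
    have h2 := @List.head?_reverse _ l
    rw [ht, List.getLast?_eq_some_getLast h] at h2
    simpa using h2
  unfold pvRunLen
  rw [List.reverse_append, List.reverse_singleton, List.singleton_append, ht]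
  simp only [List.takeWhile_cons]
  subst ha
  by_cases hb : pvOnset b = pvOnset (l.getLast h)
  · rw [if_pos hb, hb]
    simp
  · rw [if_neg hb]
    have : decide (pvOnset (l.getLast h) = pvOnset b) = false := by
      simp only [decide_eq_false_iff_not]
      exact fun e => hb e.symm
    rw [this]
    simp

lemma pvRunLen_le (l : List (List Int)) : pvRunLen l ≤ l.length := by
  unfold pvRunLen
  cases hr : l.reverse with
  | nil => simp
  | cons a t =>
    have hlen : l.length = t.length + 1 := by
      have := congrArg List.length hr
      simpa using this
    have := (List.takeWhile_sublist (p := fun r => decide (pvOnset r = pvOnset a)) (l := t)).length_le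
    dsimp only
    omega

lemma pvRunLen_pos (l : List (List Int)) (h : l ≠ []) : 1 ≤ pvRunLen l := by
  unfold pvRunLen
  cases hr : l.reverse with
  | nil => exact absurd (by simpa using hr) h
  | cons a t => dsimp only; omega

lemma Bfold (nmat : List (List Int)) : ∀ (m : Nat), 1 ≤ m → m ≤ nmat.length →
    (PySem.List.pyRange 1 (m : Int) 1).foldl
      (fun start i =>
        if PySem.List.pyGetD (PySem.List.pyGetD nmat i []) 0 0
           ≠ PySem.List.pyGetD (PySem.List.pyGetD nmat (i - 1) []) 0 0
        then i else start) 0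
      = ((m - pvRunLen (nmat.take m) : Nat) : Int) := by
  intro m h1
  induction m, h1 using Nat.le_induction with
  | base =>
    intro h1
    rw [show ((1:Nat):Int) = 1 by norm_num, PySem.List.pyRange_one_eq_nil le_rfl]
    have h0 : 0 < nmat.length := h1
    have htake : nmat.take 1 = [nmat[0]] := by
      cases nmat with
      | nil => simp at h0
      | cons a t => simp
    rw [htake]
    simp [pvRunLen]
  | succ m hm ih =>
    intro hmn
    have hm1 : m ≤ nmat.length := by omega
    have hmlt : m < nmat.length := by omega
    have hcast : ((m + 1 : Nat) : Int) = (m : Int) + 1 := by push_cast; ring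
    rw [hcast, PySem.List.pyRange_one_succ_right (by exact_mod_cast Nat.one_le_iff_ne_zero.mpr (by omega)), List.foldl_append]
    rw [ih hm1]
    -- evaluate the step at index m
    have hgm : PySem.List.pyGetD nmat (m : Int) [] = nmat[m] := by
      rw [PySem.List.pyGetD_natCast, List.getD_eq_getElem _ _ hmlt]
    have hgm1 : PySem.List.pyGetD nmat ((m : Int) - 1) [] = nmat[m - 1] := by
      have : ((m : Int) - 1) = ((m - 1 : Nat) : Int) := by omega
      rw [this, PySem.List.pyGetD_natCast, List.getD_eq_getElem _ _ (by omega)]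
    have htake : nmat.take (m + 1) = nmat.take m ++ [nmat[m]] := by
      rw [List.take_add_one]
      simp [List.getElem?_eq_getElem hmlt]
    have htm : nmat.take m ≠ [] := by
      have : (nmat.take m).length = m := by simp [min_eq_left hm1]
      intro e; rw [e] at this; simp at this; omega
    have hlast : (nmat.take m).getLast htm = nmat[m - 1] := by
      rw [List.getLast_eq_getElem]
      have hl : (nmat.take m).length = m := by simp [min_eq_left hm1]
      simp only [hl]
      rw [List.getElem_take]
    have hrl := pvRunLen_concat (nmat.take m) (nmat[m]) htm
    rw [hlast] at hrl
    have hrle : pvRunLen (nmat.take m) ≤ m := by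
      have := pvRunLen_le (nmat.take m)
      simpa [min_eq_left hm1] using this
    have hrpos := pvRunLen_pos (nmat.take m) htm
    simp only [List.foldl_cons, List.foldl_nil, hgm, hgm1]
    rw [htake, hrl]
    by_cases hb : PySem.List.pyGetD nmat[m] 0 0 = PySem.List.pyGetD nmat[m-1] 0 0
    · have : pvOnset nmat[m] = pvOnset nmat[m-1] := hb
      rw [if_neg (by simpa using hb), if_pos (by simpa [pvOnset] using this)]
      omega
    · have : ¬ (pvOnset nmat[m] = pvOnset nmat[m-1]) := hb
      rw [if_pos (by simpa using hb), if_neg (by simpa [pvOnset] using this)]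
      omega

lemma countdown_fold {σ : Type} (xs : List (List Int)) (g : σ → List Int → σ) (init : σ) :
    (PySem.List.pyRange ((xs.length : Int) - 1) (-1) (-1)).foldl
      (fun acc i => g acc (PySem.List.pyGetD xs i [])) init
      = xs.reverse.foldl g init := by
  rw [PySem.List.pyRange_neg_one, List.foldl_map]
  rw [← PySem.List.foldl_pyRange_zero_pyGetD xs.reverse [] g init, PySem.List.pyRange_one,
    List.foldl_map]
  have hlen : ((PySem.List.len xs.reverse - 0).toNat) = xs.length := by
    simp [PySem.List.len_eq]
  have hlen2 : ((xs.length : Int) - 1 - (-1)).toNat = xs.length := by omega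
  rw [hlen, hlen2]
  apply PySem.List.foldl_congr_mem
  intro acc k hk
  have hk' : k < xs.length := List.mem_range.mp hk
  congr 1
  have h1 : ((xs.length : Int) - 1 - (k : Int)) = ((xs.length - 1 - k : Nat) : Int) := by omega
  rw [h1]
  have h2 : ((0 : Int) + (k : Int)) = ((k : Nat) : Int) := by omega
  rw [h2]
  rw [PySem.List.pyGetD_natCast, PySem.List.pyGetD_natCast]
  rw [List.getD_eq_getElem _ _ (by omega), List.getD_eq_getElem _ _ (by simpa using hk')]
  rw [List.getElem_reverse]

lemma foldA_false (c : Int) (l : List (List Int)) (acc : List (List Int)) :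
    l.foldl (fun (st : List (List Int) × Bool) curr =>
        if st.2 then
          if pvOnset curr ≠ c then (st.1, false) else (st.1 ++ [curr], true)
        else st) (acc, false) = (acc, false) := by
  induction l with
  | nil => rfl
  | cons r t ih => simpa using ih

lemma foldA (c : Int) (l : List (List Int)) : ∀ acc : List (List Int),
    l.foldl (fun (st : List (List Int) × Bool) curr =>
        if st.2 then
          if pvOnset curr ≠ c then (st.1, false) else (st.1 ++ [curr], true)
        else st) (acc, true)
      = (acc ++ l.takeWhile (fun r => decide (pvOnset r = c)),
         l.all (fun r => decide (pvOnset r = c))) := by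
  induction l with
  | nil => intro acc; simp
  | cons r t ih =>
    intro acc
    by_cases h : pvOnset r = c
    · simp only [List.foldl_cons, if_pos trivial, h]
      simp only [ne_eq, not_true_eq_false, if_false]
      rw [ih (acc ++ [r])]
      simp [h, List.append_assoc]
    · simp only [List.foldl_cons]
      simp only [ne_eq, h, not_false_eq_true, if_pos]
      rw [foldA_false]
      simp [h]

lemma A_fold (nmat : List (List Int)) (c : Int) :
    (PySem.List.pyRange ((nmat.length : Int) - 1) (-1) (-1)).foldl
      (fun (st : List (List Int) × Bool) i =>
        if st.2 then
          if PySem.List.pyGetD (PySem.List.pyGetD nmat i []) 0 0 ≠ c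
          then (st.1, false)
          else (st.1 ++ [PySem.List.pyGetD nmat i []], true)
        else st) (([] : List (List Int)), true)
      = (nmat.reverse.takeWhile (fun r => decide (pvOnset r = c)),
         nmat.reverse.all (fun r => decide (pvOnset r = c))) := by
  have h1 : (PySem.List.pyRange ((nmat.length : Int) - 1) (-1) (-1)).foldl
      (fun (st : List (List Int) × Bool) i =>
        if st.2 then
          if PySem.List.pyGetD (PySem.List.pyGetD nmat i []) 0 0 ≠ c
          then (st.1, false)
          else (st.1 ++ [PySem.List.pyGetD nmat i []], true)
        else st) (([] : List (List Int)), true)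
      = nmat.reverse.foldl
        (fun (st : List (List Int) × Bool) curr =>
          if st.2 then
            if pvOnset curr ≠ c then (st.1, false) else (st.1 ++ [curr], true)
          else st) ([], true) :=
    countdown_fold nmat
      (fun (st : List (List Int) × Bool) curr =>
        if st.2 then
          if pvOnset curr ≠ c then (st.1, false) else (st.1 ++ [curr], true)
        else st) ([], true)
  rw [h1]
  simpa using foldA c nmat.reverse []

lemma pv_ports_agree (nmat : List (List Int)) :
    separate_last_note_group nmat = separate_last_note_group_alt nmat := by
  rcases List.eq_nil_or_concat nmat with hnil | ⟨ys, y, rfl⟩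
  · subst hnil; rfl
  rw [List.concat_eq_append]
  set nmat := ys ++ [y] with hnmat
  have hn : nmat.length = ys.length + 1 := by simp [hnmat]
  -- the constant onset A compares with
  have hc : PySem.List.pyGetD (PySem.List.pyGetD nmat ((nmat.length : Int) - 1) []) 0 0 = pvOnset y := by
    have h1 : ((nmat.length : Int) - 1) = ((ys.length : Nat) : Int) := by rw [hn]; push_cast; ring
    rw [h1, PySem.List.pyGetD_natCast, hnmat]
    rw [List.getD_eq_getElem _ _ (by simp)]
    simp [pvOnset]
  have hArev : nmat.reverse = y :: ys.reverse := by simp [hnmat]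
  set q : List Int → Bool := fun r => decide (pvOnset r = pvOnset y) with hq
  set L : Nat := pvRunLen nmat with hL
  have hT : nmat.reverse.takeWhile q = y :: ys.reverse.takeWhile q := by
    rw [hArev, List.takeWhile_cons, if_pos (by simp [hq])]
  have hTlen : (nmat.reverse.takeWhile q).length = L := by
    rw [hT, hL]
    unfold pvRunLen
    rw [hArev]
    simp
    rw [hq]
  have hLle : L ≤ nmat.length := pvRunLen_le nmat
  have hLpos : 1 ≤ L := pvRunLen_pos nmat (by simp [hnmat])
  have hTrev : (nmat.reverse.takeWhile q).reverse = nmat.drop (nmat.length - L) := by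
    have hpre : nmat.reverse.takeWhile q = nmat.reverse.take L := by
      have := List.prefix_iff_eq_take.mp (List.takeWhile_prefix (l := nmat.reverse) q)
      rw [hTlen] at this
      exact this
    rw [hpre, List.take_reverse]
    simp
  show separate_last_note_group nmat = separate_last_note_group_alt nmat
  unfold separate_last_note_group separate_last_note_group_alt
  simp only [hc]
  rw [A_fold nmat (pvOnset y)]
  rw [Bfold nmat nmat.length (by omega) le_rfl]
  rw [← hq]
  rw [List.take_length, ← hL]
  rw [hTrev]
  have hdroplen : (List.drop (nmat.length - L) nmat).length = L := by
    rw [List.length_drop]; omega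
  rw [hdroplen]
  rw [PySem.List.slice_to_neg_natCast nmat L (by omega)]
  rw [PySem.List.slice_from nmat (by positivity), PySem.List.slice_to nmat (by positivity)]
  simp

-- ===== VERDICT (by name: the statement is the Claim_ definition above) =====
theorem separate_last_note_group_spec : Claim_equal_separate_last_note_group := by
  intro nmat _ _
  unfold Spec_separate_last_note_group
  exact pv_ports_agree nmat
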